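-- pv_equiv track=rewrite | github.com/dtorber/TFG | codis/metrics/utils.py | get_extractive_phrases
-- ===== SOURCE A (Python) =====
-- from typing import List, Dict, Set, Tuple, Optional
--
-- def get_extractive_phrases(
--     a: List[str], s: List[str]
-- ) -> List[Tuple[int, int, List[str]]]:
--     positions: Dict[str, List[int]] = {}
--
--     for i, word in enumerate(a):
--         if word not in positions:
--             positions[word] = []
--
--         positions[word].append(i)
--
--     F_: Set[str] = set()
--     F: List[Tuple[int, int, List[str]]] = []
--     i, j = 0, 0
--
--     while i < len(s):
--         f: Optional[Tuple[int, int, List[str]]] = None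
--
--         if s[i] in positions:
--             cfp = 0
--             mlen = len(positions[s[i]])
--
--             while cfp < mlen:
--                 u = i
--                 v = positions[s[i]][cfp]
--
--                 while u < len(s) and v < len(a) and s[u] == a[v]:
--                     u += 1
--                     v += 1
--
--                 if f is None or len(f[2]) <= (u-i-1):
--                     f = (positions[s[i]][cfp], i, s[i:u])
--
--                 while cfp < mlen and positions[s[i]][cfp] <= v:
--                     cfp += 1
--
--         if f is not None:
--             i += max(len(f[2]), 1)
--         else:
--             i += 1
--
--         if f is not None and len(f[2]) > 0:
--             key = " ".join(f[2])
--
--             if key not in F_: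
--                 F.append(f)
--                 F_.add(key)
--
--     return F
-- ===== SOURCE B (Python) =====
-- def _advance(ps, k, v):
--     # first index >= k whose occurrence lies beyond v
--     while k < len(ps) and ps[k] <= v:
--         k += 1
--     return k
--
-- def get_extractive_phrases(a, s):
--     n, m = len(a), len(s)
--     # lcp[i][j] = length of the longest common prefix of s[i:] and a[j:],
--     # filled by one backward dynamic-programming sweep (row i from row i+1)
--     rev = [[0] * (n + 1)]
--     for i in range(m - 1, -1, -1):
--         nxt = rev[-1]
--         wi = s[i]
--         rev.append([nxt[j + 1] + 1 if wi == a[j] else 0 for j in range(n)] + [0])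
--     lcp = rev[::-1]
--     occ = {}
--     for j, word in enumerate(a):
--         occ.setdefault(word, []).append(j)
--     F, seen = [], set()
--     i = 0
--     while i < m:
--         step = 1
--         ps = occ.get(s[i])
--         if ps is not None:
--             row = lcp[i]
--             best_j = ps[0]
--             best_len = row[best_j]
--             k = _advance(ps, 0, best_j + best_len)
--             while k < len(ps):
--                 p = ps[k]
--                 L = row[p]
--                 if L > best_len:
--                     best_j, best_len = p, L
--                 k = _advance(ps, k, p + L)
--             phrase = s[i:i + best_len]
--             key = " ".join(phrase)
--             if key not in seen:
--                 F.append((best_j, i, phrase))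
--                 seen.add(key)
--             step = max(best_len, 1)
--         i += step
--     return F
-- ===== Notes on version B (the rewrite author's own statement) =====
-- stated objective: alternative
-- what changed: A re-matches each candidate occurrence word by word inside the scan; B precomputes a backward LCP dynamic-programming table (lcp[i][j] = longest common prefix of s[i:] and a[j:]) plus an occurrence index once, and the scan then reads each candidate's match length in O(1).
import Mathlib
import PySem

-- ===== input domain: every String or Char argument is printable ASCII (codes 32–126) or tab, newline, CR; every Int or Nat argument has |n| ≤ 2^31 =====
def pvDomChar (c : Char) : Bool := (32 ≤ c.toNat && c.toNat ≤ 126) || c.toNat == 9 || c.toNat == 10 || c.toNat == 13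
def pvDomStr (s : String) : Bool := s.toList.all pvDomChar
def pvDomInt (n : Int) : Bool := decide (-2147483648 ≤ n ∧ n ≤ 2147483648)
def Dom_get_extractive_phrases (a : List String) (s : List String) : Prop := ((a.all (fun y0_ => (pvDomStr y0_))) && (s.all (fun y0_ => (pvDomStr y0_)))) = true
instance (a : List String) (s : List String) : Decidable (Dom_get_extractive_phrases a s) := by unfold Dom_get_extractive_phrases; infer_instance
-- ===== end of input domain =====

-- B replaces A's per-candidate word-by-word re-matching with one backward LCP
-- dynamic-programming table consulted in O(1) per candidate (objective: alternative;
-- not measurably faster on random inputs — the table is only a worst-case mechanism).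

-- ===== PORT A =====

-- the inner extension loop 'while u < len(s) and v < len(a) and s[u] == a[v]: u += 1; v += 1'
def pvExtA (s a : List String) (u v : Int) : Int × Int :=
  if h : u < (s.length : Int) ∧ v < (a.length : Int) ∧
      PySem.List.pyGetD s u "" = PySem.List.pyGetD a v "" then
    pvExtA s a (u + 1) (v + 1)
  else (u, v)
termination_by ((s.length : Int) - u).toNat
decreasing_by omega

-- 'while cfp < mlen and positions[s[i]][cfp] <= v: cfp += 1'
def pvSkipA (ps : List Int) (mlen : Int) (v : Int) (cfp : Int) : Int :=
  if h : cfp < mlen ∧ PySem.List.pyGetD ps cfp 0 ≤ v then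
    pvSkipA ps mlen v (cfp + 1)
  else cfp
termination_by (mlen - cfp).toNat
decreasing_by omega

-- the candidate loop 'while cfp < mlen: …' — fuel only makes the recursion structural
def pvCandA (s a : List String) (i : Int) (ps : List Int) (mlen : Int) :
    Nat → Int → Option (Int × Int × List String) → Option (Int × Int × List String)
  | 0, _, f => f
  | fuel + 1, cfp, f =>
    if cfp < mlen then
      let p := PySem.List.pyGetD ps cfp 0
      let uv := pvExtA s a i p
      let f' : Option (Int × Int × List String) :=
        match f with
        | none => some (p, i, PySem.List.slice s (some i) (some uv.1))
        | some g =>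
          if (g.2.2.length : Int) ≤ uv.1 - i - 1 then
            some (p, i, PySem.List.slice s (some i) (some uv.1))
          else some g
      pvCandA s a i ps mlen fuel (pvSkipA ps mlen uv.2 cfp) f'
    else f

-- the positions dict built from 'for i, word in enumerate(a): …'
def pvPosA (a : List String) : PySem.Dict String (List Int) :=
  (PySem.List.enumerate a 0).foldl
    (fun d iw =>
      (if d.contains iw.2 then d else d.insert iw.2 []).modify iw.2 [] (· ++ [iw.1]))
    PySem.Dict.empty

-- the outer 'while i < len(s)' loop
def pvMainA (s a : List String) (pos : PySem.Dict String (List Int))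
    (i : Int) (F : List (Int × Int × List String)) (Fs : PySem.Set String) :
    List (Int × Int × List String) :=
  if h : i < (s.length : Int) then
    let w := PySem.List.pyGetD s i ""
    let f : Option (Int × Int × List String) :=
      if pos.contains w then
        let ps := pos.getD w []
        pvCandA s a i ps (ps.length : Int) (ps.length + 1) 0 none
      else none
    match f with
    | some g =>
      let i' := i + max ((g.2.2.length : Int)) 1
      if (g.2.2.length : Int) > 0 then
        let key := PySem.Str.join " " g.2.2
        if Fs.contains key then pvMainA s a pos i' F Fs
        else pvMainA s a pos i' (F ++ [g]) (PySem.Set.add Fs key)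
      else pvMainA s a pos i' F Fs
    | none => pvMainA s a pos (i + 1) F Fs
  else F
termination_by ((s.length : Int) - i).toNat
decreasing_by all_goals omega

def get_extractive_phrases (a : List String) (s : List String) : List (Int × Int × List String) :=
  pvMainA s a (pvPosA a) 0 [] PySem.Set.empty

-- ===== PORT B =====

-- one LCP row: '[nxt[j+1]+1 if wi == a[j] else 0 for j in range(n)] + [0]'
def pvRowB (a : List String) (wi : String) (nxt : List Int) : List Int :=
  ((PySem.List.pyRange 0 (a.length : Int) 1).map
    (fun j => if wi = PySem.List.pyGetD a j "" then PySem.List.pyGetD nxt (j + 1) 0 + 1 else 0))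
    ++ [0]

-- rows i..m of the table; Source B builds them by a reversed for-loop appending to 'rev'
-- and flipping at the end — this recursion produces the identical list front-to-back
def pvRowsB (a s : List String) (i : Nat) : List (List Int) :=
  if i < s.length then
    pvRowB a (s.getD i "") ((pvRowsB a s (i + 1)).headD []) :: pvRowsB a s (i + 1)
  else [List.replicate (a.length + 1) 0]
termination_by s.length - i

-- '_advance(ps, k, v)'
def pvAdvB (ps : List Int) (k : Int) (v : Int) : Int :=
  if h : k < (ps.length : Int) ∧ PySem.List.pyGetD ps k 0 ≤ v then
    pvAdvB ps (k + 1) v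
  else k
termination_by ((ps.length : Int) - k).toNat
decreasing_by omega

-- 'while k < len(ps): …' over (best_j, best_len); fuel only makes the recursion structural
def pvLoopB (row ps : List Int) : Nat → Int → Int → Int → Int × Int
  | 0, _, bj, bl => (bj, bl)
  | fuel + 1, k, bj, bl =>
    if k < (ps.length : Int) then
      let p := PySem.List.pyGetD ps k 0
      let L := PySem.List.pyGetD row p 0
      let bb := if L > bl then (p, L) else (bj, bl)
      pvLoopB row ps fuel (pvAdvB ps k (p + L)) bb.1 bb.2
    else (bj, bl)

-- 'occ.setdefault(word, []).append(j)'
def pvOccB (a : List String) : PySem.Dict String (List Int) :=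
  (PySem.List.enumerate a 0).foldl
    (fun d jw => (d.setdefault jw.2 []).modify jw.2 [] (· ++ [jw.1]))
    PySem.Dict.empty

def pvMainB (s a : List String) (lcp : List (List Int)) (occ : PySem.Dict String (List Int))
    (i : Int) (F : List (Int × Int × List String)) (seen : PySem.Set String) :
    List (Int × Int × List String) :=
  if h : i < (s.length : Int) then
    match occ.get? (PySem.List.pyGetD s i "") with
    | none => pvMainB s a lcp occ (i + 1) F seen
    | some ps =>
      let row := PySem.List.pyGetD lcp i []
      let bj0 := PySem.List.pyGetD ps 0 0
      let bl0 := PySem.List.pyGetD row bj0 0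
      let k0 := pvAdvB ps 0 (bj0 + bl0)
      let bb := pvLoopB row ps ps.length k0 bj0 bl0
      let phrase := PySem.List.slice s (some i) (some (i + bb.2))
      let key := PySem.Str.join " " phrase
      let Fseen := if seen.contains key then (F, seen)
        else (F ++ [(bb.1, i, phrase)], PySem.Set.add seen key)
      pvMainB s a lcp occ (i + max bb.2 1) Fseen.1 Fseen.2
  else F
termination_by ((s.length : Int) - i).toNat
decreasing_by all_goals omega

def get_extractive_phrases_alt (a : List String) (s : List String) : List (Int × Int × List String) :=
  pvMainB s a (pvRowsB a s 0) (pvOccB a) 0 [] PySem.Set.empty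

-- ===== PRECONDITION & SPEC =====
def Spec_get_extractive_phrases (a : List String) (s : List String) (out : List (Int × Int × List String)) : Prop := out = get_extractive_phrases_alt a s
instance (a : List String) (s : List String) (out : List (Int × Int × List String)) : Decidable (Spec_get_extractive_phrases a s out) := by unfold Spec_get_extractive_phrases; infer_instance

-- ===== CLAIM (what is proved, stated in full; the proofs are below) =====
def Claim_equal_get_extractive_phrases : Prop := ∀ (a : List String) (s : List String), Dom_get_extractive_phrases a s → Spec_get_extractive_phrases a s (get_extractive_phrases a s)

-- ===== LEMMAS AND PROOFS =====

-- the length of the common extension, as a Nat-valued function of Nat indices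
def pvE (s a : List String) (i j : Nat) : Nat :=
  if h : i < s.length ∧ j < a.length ∧ s.getD i "" = a.getD j "" then
    pvE s a (i + 1) (j + 1) + 1
  else 0
termination_by s.length - i
decreasing_by omega

theorem pvE_le (s a : List String) (i j : Nat) : pvE s a i j ≤ s.length - i := by
  fun_induction pvE s a i j with
  | case1 i j h ih => omega
  | case2 i j h => omega

theorem pvE_pos (s a : List String) (i j : Nat) (hi : i < s.length) (hj : j < a.length)
    (he : s.getD i "" = a.getD j "") : 1 ≤ pvE s a i j := by
  rw [pvE]; rw [dif_pos ⟨hi, hj, he⟩]; omega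

theorem ext_spec (s a : List String) (u v : Nat) :
    pvExtA s a u v = (((u + pvE s a u v : Nat) : Int), ((v + pvE s a u v : Nat) : Int)) := by
  fun_induction pvE s a u v with
  | case1 u v h ih =>
    rw [pvExtA, dif_pos (by push_cast; simpa using h)]
    push_cast
    rw [show ((u : Int) + 1 = ((u + 1 : Nat) : Int)) by push_cast; ring,
        show ((v : Int) + 1 = ((v + 1 : Nat) : Int)) by push_cast; ring, ih]
    rw [Prod.mk.injEq]; constructor <;> (push_cast; ring)
  | case2 u v h =>
    rw [pvExtA, dif_neg (by push_cast; simpa using h)]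
    simp

theorem rows_getD (a s : List String) :
    ∀ (t i : Nat), i + t ≤ s.length →
      (pvRowsB a s i).getD t [] = (pvRowsB a s (i + t)).headD [] := by
  intro t
  induction t with
  | zero =>
    intro i _
    rw [show i + 0 = i from rfl]
    conv_lhs => rw [pvRowsB]
    conv_rhs => rw [pvRowsB]
    split <;> simp
  | succ t ih =>
    intro i hi
    conv_lhs => rw [pvRowsB]
    rw [if_pos (by omega)]
    simpa [show i + (t + 1) = (i + 1) + t by omega] using ih (i + 1) (by omega)

theorem row_spec (a s : List String) :
    ∀ (i : Nat), i ≤ s.length → ∀ (j : Nat), j ≤ a.length →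
      ((pvRowsB a s i).headD []).getD j 0 = ((pvE s a i j : Nat) : Int) := by
  intro i
  induction hi : s.length - i using Nat.strong_induction_on generalizing i with
  | _ d ih =>
  intro him j hj
  by_cases hlt : i < s.length
  · rw [pvRowsB, if_pos hlt]
    simp only [List.headD_cons]
    unfold pvRowB
    set f : Int → Int := fun j =>
      if s.getD i "" = PySem.List.pyGetD a j "" then
        PySem.List.pyGetD ((pvRowsB a s (i + 1)).headD []) (j + 1) 0 + 1
      else 0 with hf
    rcases Nat.lt_or_ge j a.length with hjn | hjn
    · have hlen : ((PySem.List.pyRange 0 (a.length : Int) 1).map f).length = a.length := by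
        simp [PySem.List.length_pyRange_one]
      rw [List.getD_append _ _ _ _ (by omega)]
      have h1 : ((PySem.List.pyRange 0 (a.length : Int) 1).map f).getD j 0 = f (j : Int) := by
        rw [← PySem.List.pyGetD_natCast]
        exact PySem.List.pyGetD_map_pyRange f a.length j 0 hjn
      rw [h1, hf]
      beta_reduce
      have hidx : PySem.List.pyGetD ((pvRowsB a s (i + 1)).headD []) ((j : Int) + 1) 0
          = ((pvE s a (i + 1) (j + 1) : Nat) : Int) := by
        rw [show ((j : Int) + 1) = ((j + 1 : Nat) : Int) by push_cast; ring,
            PySem.List.pyGetD_natCast]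
        exact ih (s.length - (i + 1)) (by omega) (i + 1) rfl (by omega) (j + 1) (by omega)
      rw [show PySem.List.pyGetD a (j : Int) "" = a.getD j "" from PySem.List.pyGetD_natCast ..]
      by_cases hcond : s.getD i "" = a.getD j ""
      · rw [if_pos hcond, hidx]
        conv_rhs => rw [pvE]
        rw [dif_pos ⟨hlt, hjn, hcond⟩]
        push_cast; ring
      · rw [if_neg hcond, pvE, dif_neg (by intro hc; exact hcond hc.2.2)]
        simp
    · have hj' : j = a.length := by omega
      subst hj'
      rw [List.getD_append_right _ _ _ _ (by simp [PySem.List.length_pyRange_one])]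
      rw [pvE, dif_neg (by omega)]
      simp [PySem.List.length_pyRange_one]
  · rw [pvRowsB, if_neg hlt]
    rw [pvE, dif_neg (by omega)]
    simp [List.getD_replicate]

theorem slice_len (s : List String) (i L : Nat) (h : i + L ≤ s.length) :
    (PySem.List.slice s (some (i : Int)) (some ((i : Int) + (L : Int)))).length = L := by
  rw [PySem.List.slice_natCast_add]
  simp
  omega

theorem adv_ge (ps : List Int) (k v : Int) : k ≤ pvAdvB ps k v := by
  fun_induction pvAdvB ps k v with
  | case1 k h ih => omega
  | case2 k h => omega

theorem skip_eq_adv (ps : List Int) (v k : Int) :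
    pvSkipA ps (ps.length : Int) v k = pvAdvB ps k v := by
  fun_induction pvAdvB ps k v with
  | case1 k h ih => rw [pvSkipA, dif_pos h]; exact ih
  | case2 k h => rw [pvSkipA, dif_neg h]

theorem loopB_ge (row ps : List Int) :
    ∀ (fuel : Nat) (k bj bl : Int), bl ≤ (pvLoopB row ps fuel k bj bl).2 := by
  intro fuel
  induction fuel with
  | zero => intro k bj bl; simp [pvLoopB]
  | succ fuel ih =>
    intro k bj bl
    rw [pvLoopB]
    dsimp only
    split
    · split
      · rename_i hL; exact le_trans (by omega) (ih ..)
      · exact ih ..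
    · simp

theorem occ_eq_pos (a : List String) : pvOccB a = pvPosA a := by
  unfold pvOccB pvPosA
  congr 1
  funext d iw
  by_cases hc : d.contains iw.2
  · rw [PySem.Dict.setdefault_of_contains d [] hc, if_pos hc]
  · rw [PySem.Dict.setdefault_of_not_contains d [] (by simpa using hc), if_neg hc]

-- invariant of the positions/occurrence dict
def pvDictP (a : List String) (w : String) (p : Int) : Prop :=
  0 ≤ p ∧ p < (a.length : Int) ∧ PySem.List.pyGetD a p "" = w

def pvInv (a : List String) (d : PySem.Dict String (List Int)) : Prop :=
  ∀ w, (d.contains w = true → d.getD w [] ≠ []) ∧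
    ∀ p ∈ d.getD w [], pvDictP a w p

theorem posInv_fold (a : List String) :
    ∀ (l : List (Int × String)) (d : PySem.Dict String (List Int)), pvInv a d →
      (∀ q ∈ l, pvDictP a q.2 q.1) →
      pvInv a (l.foldl
        (fun d iw =>
          (if d.contains iw.2 then d else d.insert iw.2 []).modify iw.2 [] (· ++ [iw.1])) d) := by
  intro l
  induction l with
  | nil => intro d hd _; exact hd
  | cons q l ih =>
    intro d hd hl
    rw [List.foldl_cons]
    refine ih _ ?_ (fun q' hq' => hl q' (List.mem_cons_of_mem _ hq'))
    intro w
    by_cases hw : w = q.2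
    · subst hw
      constructor
      · intro _
        rw [PySem.Dict.getD_modify, if_pos rfl]
        simp
      · intro p hp
        rw [PySem.Dict.getD_modify, if_pos rfl] at hp
        have hbase : (if d.contains q.2 then d else d.insert q.2 []).getD q.2 [] = d.getD q.2 [] := by
          split
          · rfl
          · rename_i hnc
            have hg : d.get? q.2 = none := by
              rcases hg : d.get? q.2 with _ | v
              · rfl
              · have := PySem.Dict.contains_eq_isSome_get? d q.2
                rw [hg] at this
                simp_all
            rw [PySem.Dict.getD_insert, if_pos rfl, PySem.Dict.getD_eq_get?_getD, hg]
            rfl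
        rw [hbase] at hp
        rcases List.mem_append.mp hp with hp | hp
        · exact (hd q.2).2 p hp
        · rw [List.mem_singleton.mp hp]
          exact hl q (List.mem_cons_self ..)
    · have hbase : (if d.contains q.2 then d else d.insert q.2 []).getD w [] = d.getD w [] := by
        split
        · rfl
        · rw [PySem.Dict.getD_insert, if_neg hw]
      have hbc : (if d.contains q.2 then d else d.insert q.2 []).contains w = d.contains w := by
        split
        · rfl
        · rw [PySem.Dict.contains_insert]
          simp [hw]
      constructor
      · intro hco
        rw [PySem.Dict.contains_modify, hbc] at hco
        have hco' : d.contains w = true := by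
          simp [hw] at hco
          exact hco
        rw [PySem.Dict.getD_modify, if_neg hw, hbase]
        exact (hd w).1 hco'
      · intro p hp
        rw [PySem.Dict.getD_modify, if_neg hw, hbase] at hp
        exact (hd w).2 p hp

theorem posInv (a : List String) : pvInv a (pvPosA a) := by
  unfold pvPosA
  refine posInv_fold a _ _ (fun w => ⟨by simp [PySem.Dict.contains_empty], by simp [PySem.Dict.getD_empty]⟩) ?_
  intro q hq
  rcases (PySem.List.mem_enumerate_iff a 0 q).mp hq with ⟨k, hk, rfl⟩
  refine ⟨by omega, by push_cast; omega, ?_⟩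
  rw [show ((0 : Int) + (k : Int)) = ((k : Nat) : Int) by push_cast; ring]
  rw [PySem.List.pyGetD_natCast, List.getD_eq_getElem a "" hk]

theorem loopB_inv (row ps : List Int) (P : Int → Prop)
    (hP : ∀ p ∈ ps, P (PySem.List.pyGetD row p 0)) :
    ∀ (fuel : Nat) (k bj bl : Int), 0 ≤ k → P bl → P (pvLoopB row ps fuel k bj bl).2 := by
  intro fuel
  induction fuel with
  | zero => intro k bj bl _ h; simpa [pvLoopB] using h
  | succ fuel ih =>
    intro k bj bl hk hbl
    rw [pvLoopB]
    dsimp only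
    split
    · rename_i hlt
      have hmem : PySem.List.pyGetD ps k 0 ∈ ps :=
        PySem.List.pyGetD_mem ps 0 ⟨by omega, hlt⟩
      have hadv : 0 ≤ pvAdvB ps k (PySem.List.pyGetD ps k 0 + PySem.List.pyGetD row (PySem.List.pyGetD ps k 0) 0) :=
        le_trans hk (adv_ge ..)
      split
      · exact ih _ _ _ hadv (hP _ hmem)
      · exact ih _ _ _ hadv hbl
    · simpa [pvLoopB] using hbl

theorem cand_eq (s a : List String) (i : Nat) (ps row : List Int)
    (hps : ∀ p ∈ ps, 0 ≤ p ∧ p < (a.length : Int))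
    (hrow : ∀ p : Int, 0 ≤ p → p < (a.length : Int) →
      PySem.List.pyGetD row p 0 = ((pvE s a i p.toNat : Nat) : Int)) :
    ∀ (fuel : Nat) (k bj bl : Int), 0 ≤ k → 0 ≤ bl → (i : Int) + bl ≤ (s.length : Int) →
      pvCandA s a i ps (ps.length : Int) fuel k
        (some (bj, (i : Int), PySem.List.slice s (some (i : Int)) (some ((i : Int) + bl))))
      = some ((pvLoopB row ps fuel k bj bl).1, (i : Int),
          PySem.List.slice s (some (i : Int)) (some ((i : Int) + (pvLoopB row ps fuel k bj bl).2))) := by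
  intro fuel
  induction fuel with
  | zero => intro k bj bl _ _ _; rfl
  | succ fuel ih =>
    intro k bj bl hk hbl hible
    rw [pvCandA, pvLoopB]
    dsimp only
    split
    · rename_i hlt
      -- the current candidate p and its extension length E
      have hmem : PySem.List.pyGetD ps k 0 ∈ ps :=
        PySem.List.pyGetD_mem ps 0 ⟨by omega, hlt⟩
      obtain ⟨hp0, hpn⟩ := hps _ hmem
      set p := PySem.List.pyGetD ps k 0 with hpdef
      set E := pvE s a i p.toNat with hEdef
      have hext : pvExtA s a (i : Int) p = (((i + E : Nat) : Int), ((p.toNat + E : Nat) : Int)) := by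
        rw [show p = ((p.toNat : Nat) : Int) by omega]
        exact ext_spec s a i p.toNat
      have hL : PySem.List.pyGetD row p 0 = ((E : Nat) : Int) := hrow p hp0 hpn
      have hElen : (E : Int) ≤ (s.length : Int) - (i : Int) := by
        have := pvE_le s a i p.toNat
        omega
      -- the stored phrase has length bl
      have hflen : ((PySem.List.slice s (some (i : Int)) (some ((i : Int) + bl))).length : Int) = bl := by
        rw [show ((i : Int) + bl) = ((i : Int) + ((bl.toNat : Nat) : Int)) by omega]
        rw [slice_len s i bl.toNat (by omega)]
        omega
      have hcond : (((PySem.List.slice s (some (i : Int)) (some ((i : Int) + bl))).length : Int)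
          ≤ (pvExtA s a (i : Int) p).1 - (i : Int) - 1) ↔ (PySem.List.pyGetD row p 0 > bl) := by
        rw [hext, hL, hflen]
        push_cast
        omega
      have hskip : pvSkipA ps (ps.length : Int) (pvExtA s a (i : Int) p).2 k
          = pvAdvB ps k (p + PySem.List.pyGetD row p 0) := by
        rw [skip_eq_adv, hext, hL]
        congr 1
        omega
      have hadv : 0 ≤ pvAdvB ps k (p + PySem.List.pyGetD row p 0) := le_trans hk (adv_ge ..)
      by_cases hgt : PySem.List.pyGetD row p 0 > bl
      · rw [if_pos (hcond.mpr hgt), if_pos hgt, hskip]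
        rw [show (pvExtA s a (i : Int) p).1 = (i : Int) + ((E : Nat) : Int) by rw [hext]; push_cast; ring]
        rw [← hL]
        exact ih _ _ _ hadv (by rw [hL]; positivity) (by rw [hL]; omega)
      · rw [if_neg (fun hc => hgt (hcond.mp hc)), if_neg hgt, hskip]
        exact ih _ _ _ hadv hbl hible
    · rfl

theorem rows_acc (a s : List String) (i : Nat) (hi : i ≤ s.length) :
    PySem.List.pyGetD (pvRowsB a s 0) (i : Int) [] = (pvRowsB a s i).headD [] := by
  rw [PySem.List.pyGetD_natCast]
  simpa using rows_getD a s i 0 (by omega)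

theorem main_eq (s a : List String) :
    ∀ (N : Nat) (i : Nat) (F : List (Int × Int × List String)) (seen : PySem.Set String),
      s.length - i ≤ N →
      pvMainA s a (pvPosA a) (i : Int) F seen
        = pvMainB s a (pvRowsB a s 0) (pvPosA a) (i : Int) F seen := by
  intro N
  induction N with
  | zero =>
    intro i F seen hN
    rw [pvMainA, dif_neg (by push_cast; omega), pvMainB, dif_neg (by push_cast; omega)]
  | succ N ih =>
    intro i F seen hN
    by_cases him : i < s.length
    · rw [pvMainA, dif_pos (by push_cast; omega), pvMainB, dif_pos (by push_cast; omega)]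
      dsimp only
      set w := PySem.List.pyGetD s (i : Int) "" with hwdef
      rcases hg : (pvPosA a).get? w with _ | ps
      · rw [if_neg (by rw [PySem.Dict.contains_eq_isSome_get?, hg]; simp)]
        rw [show ((i : Int) + 1) = ((i + 1 : Nat) : Int) by push_cast; ring]
        exact ih (i + 1) F seen (by omega)
      · rw [if_pos (by rw [PySem.Dict.contains_eq_isSome_get?, hg]; simp)]
        rw [PySem.Dict.getD_of_get?_eq_some _ _ hg]
        have hco : (pvPosA a).contains w = true := by
          rw [PySem.Dict.contains_eq_isSome_get?, hg]; simp
        have hgetd : (pvPosA a).getD w [] = ps := PySem.Dict.getD_of_get?_eq_some _ _ hg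
        have hne : ps ≠ [] := by
          have := (posInv a w).1 hco
          rwa [hgetd] at this
        have hmemP : ∀ p ∈ ps, pvDictP a w p := by
          have := (posInv a w).2
          rwa [hgetd] at this
        have hlen0 : (0 : Int) < (ps.length : Int) := by
          have : ps.length ≠ 0 := fun h => hne (List.eq_nil_of_length_eq_zero h)
          omega
        -- the B-side row and its specification
        set row := PySem.List.pyGetD (pvRowsB a s 0) (i : Int) [] with hrowdef
        have hrow : ∀ p : Int, 0 ≤ p → p < (a.length : Int) →
            PySem.List.pyGetD row p 0 = ((pvE s a i p.toNat : Nat) : Int) := by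
          intro p h0 hn
          rw [hrowdef, rows_acc a s i (by omega), PySem.List.pyGetD_of_nonneg _ _ h0]
          exact row_spec a s i (by omega) p.toNat (by omega)
        -- the first candidate
        have h0mem : PySem.List.pyGetD ps 0 0 ∈ ps :=
          PySem.List.pyGetD_mem ps 0 ⟨by omega, hlen0⟩
        obtain ⟨hp00, hp0n, hp0w⟩ := hmemP _ h0mem
        set p0 := PySem.List.pyGetD ps 0 0 with hp0def
        set E0 := pvE s a i p0.toNat with hE0def
        have hext0 : pvExtA s a (i : Int) p0 = (((i + E0 : Nat) : Int), ((p0.toNat + E0 : Nat) : Int)) := by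
          rw [show p0 = ((p0.toNat : Nat) : Int) by omega]
          exact ext_spec s a i p0.toNat
        have hbl0 : PySem.List.pyGetD row p0 0 = ((E0 : Nat) : Int) := hrow p0 hp00 hp0n
        have hE0pos : 1 ≤ E0 := by
          refine pvE_pos s a i p0.toNat him (by omega) ?_
          have h1 : PySem.List.pyGetD s (i : Int) "" = s.getD i "" := PySem.List.pyGetD_natCast ..
          have h2 : PySem.List.pyGetD a p0 "" = a.getD p0.toNat "" :=
            PySem.List.pyGetD_of_nonneg a "" hp00
          rw [← h1, ← h2, hp0w]
        -- unroll A's candidate loop once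
        rw [pvCandA]
        dsimp only
        rw [if_pos hlen0, hext0]
        dsimp only
        rw [skip_eq_adv]
        rw [show (((i + E0 : Nat) : Int)) = ((i : Int) + ((E0 : Nat) : Int)) by push_cast; ring]
        rw [show (((p0.toNat + E0 : Nat) : Int)) = p0 + ((E0 : Nat) : Int) by push_cast; omega]
        rw [hbl0]
        set k0 := pvAdvB ps 0 (p0 + ((E0 : Nat) : Int)) with hk0def
        have hcand := cand_eq s a i ps row (fun p hp => ⟨(hmemP p hp).1, (hmemP p hp).2.1⟩) hrow
          ps.length k0 p0 ((E0 : Nat) : Int)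
          (le_trans (by omega) (adv_ge ..)) (by positivity)
          (by have := pvE_le s a i p0.toNat; push_cast; omega)
        rw [hcand]
        set bb := pvLoopB row ps ps.length k0 p0 ((E0 : Nat) : Int) with hbbdef
        dsimp only
        have hbbP : 0 ≤ bb.2 ∧ (i : Int) + bb.2 ≤ (s.length : Int) := by
          rw [hbbdef]
          refine loopB_inv row ps (fun x => 0 ≤ x ∧ (i : Int) + x ≤ (s.length : Int)) ?_
            ps.length k0 p0 ((E0 : Nat) : Int) (le_trans (by omega) (adv_ge ..)) ?_
          · intro p hp
            rw [hrow p (hmemP p hp).1 (hmemP p hp).2.1]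
            have := pvE_le s a i p.toNat
            exact ⟨by positivity, by push_cast; omega⟩
          · have := pvE_le s a i p0.toNat
            exact ⟨by positivity, by push_cast; omega⟩
        have hbbpos : 1 ≤ bb.2 := by
          have h1 := loopB_ge row ps ps.length k0 p0 ((E0 : Nat) : Int)
          rw [← hbbdef] at h1
          omega
        have hflen : ((PySem.List.slice s (some (i : Int)) (some ((i : Int) + bb.2))).length : Int) = bb.2 := by
          rw [show ((i : Int) + bb.2) = ((i : Int) + ((bb.2.toNat : Nat) : Int)) by omega]
          rw [slice_len s i bb.2.toNat (by omega)]
          omega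
        rw [if_pos (by rw [hflen]; omega)]
        have hcast : ∀ (F' : List (Int × Int × List String)) (seen' : PySem.Set String),
            pvMainA s a (pvPosA a)
              ((i : Int) + max (((PySem.List.slice s (some (i : Int)) (some ((i : Int) + bb.2))).length : Nat) : Int) 1) F' seen'
            = pvMainB s a (pvRowsB a s 0) (pvPosA a) ((i : Int) + max bb.2 1) F' seen' := by
          intro F' seen'
          rw [hflen]
          rw [show ((i : Int) + max bb.2 1) = ((i + (max bb.2 1).toNat : Nat) : Int) by
            push_cast; omega]
          exact ih (i + (max bb.2 1).toNat) F' seen' (by omega)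
        by_cases hsk : seen.contains (PySem.Str.join " "
            (PySem.List.slice s (some (i : Int)) (some ((i : Int) + bb.2)))) = true
        · rw [if_pos hsk, if_pos hsk]
          exact hcast ..
        · rw [if_neg hsk, if_neg hsk]
          exact hcast ..
    · rw [pvMainA, dif_neg (by push_cast; omega), pvMainB, dif_neg (by push_cast; omega)]

-- ===== VERDICT (by name: the statement is the Claim_ definition above) =====
theorem get_extractive_phrases_spec : Claim_equal_get_extractive_phrases := by
  intro a s _
  unfold Spec_get_extractive_phrases get_extractive_phrases get_extractive_phrases_alt
  rw [occ_eq_pos]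
  simpa using main_eq s a s.length 0 [] PySem.Set.empty (by omega)
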